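-- pv_equiv track=rewrite | github.com/swathypatel/swathypatel | graphs/2_check_if_euler_path_exists.py | check_if_eulerian_path_exists
-- ===== SOURCE A (Python) =====
-- def check_if_eulerian_path_exists(n, edges):
--     """
--     Args:
--      n(int32)
--      edges(list_list_int32)
--     Returns:
--      bool
--     """
--     # Write your code here.
--     #return False
--
--     # calculate the degree at each vertex.
--     vertex_edges = [0 for _ in range(n)] # initialize all vertices with 0.
--     for i, j in edges: # for every edge start point and end point, incrment by 1.
--         vertex_edges[i] += 1
--         vertex_edges[j] += 1
--
--     vertices_with_odd_degree = 0
--     # vertex_edges will have example: 0th vertex has 2 edges, 1st index(vertex) has 4 etc.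
--     for each_vertex in vertex_edges:
--         if each_vertex % 2 == 1: # if a vertex has odd edge, increment by 1
--             vertices_with_odd_degree += 1
--     if vertices_with_odd_degree == 0 or vertices_with_odd_degree == 2: # if vertices are 0 or 2 with odd degree, return True.
--         return True
--     return False
-- ===== SOURCE B (Python) =====
-- def check_if_eulerian_path_exists(n, edges):
--     # Sort all edge endpoints, then scan runs of equal labels: a vertex has odd
--     # degree iff its run has odd length; Eulerian path iff 0 or 2 odd vertices.
--     endpoints = []
--     for i, j in edges:
--         endpoints.append(i)
--         endpoints.append(j)
--     endpoints.sort()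
--     odd = 0
--     run = 0
--     prev = None
--     for v in endpoints:
--         if prev is not None and v != prev:
--             odd += run % 2
--             run = 0
--         run += 1
--         prev = v
--     odd += run % 2  # close the final run (no-op on an empty endpoint list)
--     return odd == 0 or odd == 2
-- ===== Notes on version B (the rewrite author's own statement) =====
-- stated objective: alternative
-- what changed: Replaces A's direct-addressed degree array plus second counting pass by sort-then-scan: sort all edge endpoints and count runs of equal labels with odd length in one sweep; Pre_ excludes inputs that use both a vertex label x and the label x - n, where A's negative list indexing merges the two labels into one vertex while B keeps them distinct - an unspecified corner where either reading is defensible.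
-- outside the precondition, e.g. on check_if_eulerian_path_exists(3, [[-1, 0], [2, 1]]): A returns True, B returns False; on check_if_eulerian_path_exists(2, [[-1, 0], [1, 0]]): A returns True, B returns True
import Mathlib
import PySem

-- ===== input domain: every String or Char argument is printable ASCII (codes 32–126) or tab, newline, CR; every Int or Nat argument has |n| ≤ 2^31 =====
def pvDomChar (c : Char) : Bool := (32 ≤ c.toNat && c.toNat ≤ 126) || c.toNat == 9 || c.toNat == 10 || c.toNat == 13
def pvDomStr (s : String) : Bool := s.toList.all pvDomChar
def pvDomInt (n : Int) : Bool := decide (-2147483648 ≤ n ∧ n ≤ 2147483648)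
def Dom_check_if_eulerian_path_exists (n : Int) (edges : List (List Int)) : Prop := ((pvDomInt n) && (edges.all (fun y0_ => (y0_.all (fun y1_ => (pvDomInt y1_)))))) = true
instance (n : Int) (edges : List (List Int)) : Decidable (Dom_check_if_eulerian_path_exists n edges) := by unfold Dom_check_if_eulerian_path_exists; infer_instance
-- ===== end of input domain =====

-- B replaces A's direct-addressed degree array and second counting pass by sort-then-scan:
-- sort all edge endpoints and count runs of equal labels with odd length (objective: alternative).

-- ===== PORT A =====
-- vertex_edges[i] += 1  (Python indexing: pySetD/pyGetD; under Pre_ the index is in range)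
def pvIncr (ve : List Int) (i : Int) : List Int :=
  PySem.List.pySetD ve i (PySem.List.pyGetD ve i 0 + 1)

-- body of A's first loop for one edge [i, j]; other shapes raise in Python (excluded by Pre_)
def pvStepA (ve : List Int) (e : List Int) : List Int :=
  match e with
  | [i, j] => pvIncr (pvIncr ve i) j
  | _ => ve

def check_if_eulerian_path_exists (n : Int) (edges : List (List Int)) : Bool :=
  let vertex_edges :=
    edges.foldl pvStepA ((PySem.List.pyRange 0 n 1).map (fun _ => (0 : Int)))
  let vertices_with_odd_degree :=
    vertex_edges.foldl (fun c v => if PySem.Int.mod v 2 == 1 then c + 1 else c) (0 : Int)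
  if vertices_with_odd_degree == 0 || vertices_with_odd_degree == 2 then true else false

-- ===== PORT B =====
-- first loop: unpack each edge as a pair and collect both endpoints
-- (a non-pair row raises in Python; those inputs are excluded by Pre_)
def pvGather (acc : List Int) (e : List Int) : List Int :=
  match e with
  | [i, j] => acc ++ [i] ++ [j]
  | _ => acc

-- second loop body: close the current run when the label changes, then extend the run
def pvScanStep (st : Int × Int × Option Int) (v : Int) : Int × Int × Option Int :=
  match st with
  | (odd, run, prev) =>
    match prev with
    | some p =>
        if v ≠ p then (odd + PySem.Int.mod run 2, 0 + 1, some v)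
        else (odd, run + 1, some v)
    | none => (odd, run + 1, some v)

def check_if_eulerian_path_exists_alt (n : Int) (edges : List (List Int)) : Bool :=
  let endpoints := PySem.List.sorted (edges.foldl pvGather []) (fun x => x)
  let st := endpoints.foldl pvScanStep ((0 : Int), (0 : Int), (none : Option Int))
  let odd := st.1 + PySem.Int.mod st.2.1 2
  odd == 0 || odd == 2

-- ===== PRECONDITION & SPEC =====
-- Pre_ admits every input on which A returns — each edge a pair with endpoints in [-n, n)
-- (outside that range A raises ValueError or IndexError) — except inputs that use both a label
-- x and the label x - n: there A's negative list indexing identifies the two labels as one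
-- vertex while B treats the labels as opaque, a corner no caller of an n-vertex graph
-- specifies, and both readings are defensible.
def Pre_check_if_eulerian_path_exists (n : Int) (edges : List (List Int)) : Prop :=
  (∀ e ∈ edges, e.length = 2 ∧ ∀ x ∈ e, -n ≤ x ∧ x < n) ∧
  (∀ e1 ∈ edges, ∀ x ∈ e1, ∀ e2 ∈ edges, ∀ y ∈ e2, x - y ≠ n)
instance (n : Int) (edges : List (List Int)) : Decidable (Pre_check_if_eulerian_path_exists n edges) := by unfold Pre_check_if_eulerian_path_exists; infer_instance

def pvWitness_check_if_eulerian_path_exists : Int × List (List Int) := (3, [[0, 1], [1, 2]])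

def Spec_check_if_eulerian_path_exists (n : Int) (edges : List (List Int)) (out : Bool) : Prop := out = check_if_eulerian_path_exists_alt n edges
instance (n : Int) (edges : List (List Int)) (out : Bool) : Decidable (Spec_check_if_eulerian_path_exists n edges out) := by unfold Spec_check_if_eulerian_path_exists; infer_instance

-- ===== CLAIM (what is proved, stated in full; the proofs are below) =====
def Claim_equal_check_if_eulerian_path_exists : Prop := ∀ (n : Int) (edges : List (List Int)), Dom_check_if_eulerian_path_exists n edges → Pre_check_if_eulerian_path_exists n edges → Spec_check_if_eulerian_path_exists n edges (check_if_eulerian_path_exists n edges)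

-- ===== LEMMAS AND PROOFS =====

-- number of distinct values occurring an odd number of times
def oddVals (xs : List Int) : Nat :=
  xs.dedup.countP (fun v => xs.count v % 2 == 1)

lemma oddVals_perm {xs ys : List Int} (h : xs.Perm ys) : oddVals xs = oddVals ys := by
  unfold oddVals
  rw [List.countP_congr (fun v _ => by rw [h.count_eq])]
  exact h.dedup.countP_eq _

lemma oddVals_split (xs : List Int) (p : Int) (hp : p ∈ xs) :
    oddVals xs = oddVals (xs.filter (fun x => x ≠ p)) + xs.count p % 2 := by
  unfold oddVals
  have hpd : p ∈ xs.dedup := List.mem_dedup.mpr hp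
  have hperm : xs.dedup.Perm (p :: xs.dedup.erase p) := List.perm_cons_erase hpd
  rw [hperm.countP_eq]
  simp only [List.countP_cons]
  have h1 : (xs.dedup.erase p).countP (fun v => xs.count v % 2 == 1)
      = (xs.filter (fun x => x ≠ p)).dedup.countP
          (fun v => (xs.filter (fun x => x ≠ p)).count v % 2 == 1) := by
    have hnd1 : (xs.dedup.erase p).Nodup := xs.nodup_dedup.erase p
    have hnd2 : ((xs.filter (fun x => x ≠ p)).dedup).Nodup := List.nodup_dedup _
    have hmem : ∀ a : Int, a ∈ xs.dedup.erase p ↔ a ∈ (xs.filter (fun x => x ≠ p)).dedup := by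
      intro a
      rw [xs.nodup_dedup.mem_erase_iff, List.mem_dedup, List.mem_dedup, List.mem_filter]
      simp only [ne_eq, decide_eq_true_eq]
      tauto
    have hperm2 : (xs.dedup.erase p).Perm ((xs.filter (fun x => x ≠ p)).dedup) :=
      (List.perm_ext_iff_of_nodup hnd1 hnd2).mpr hmem
    rw [hperm2.countP_eq]
    apply List.countP_congr
    intro v hv
    have hvp : v ≠ p := by
      rw [← hmem v, xs.nodup_dedup.mem_erase_iff] at hv
      exact hv.1
    rw [List.count_filter (by simp [hvp])]
  rw [h1]
  rcases Nat.mod_two_eq_zero_or_one (xs.count p) with h | h <;> simp [h]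

-- the scan over a nondecreasing nonempty list ys ++ [v]
lemma pvScan_snoc (ys : List Int) (v : Int) (h : (ys ++ [v]).Pairwise (· ≤ ·)) :
    (ys ++ [v]).foldl pvScanStep ((0 : Int), (0 : Int), (none : Option Int)) =
      ((oddVals (ys.filter (fun x => x ≠ v)) : Int), ((ys.count v : Int) + 1), some v) := by
  induction ys using List.reverseRecOn generalizing v with
  | nil => simp [pvScanStep, oddVals]
  | append_singleton zs p ih =>
    have hzp : (zs ++ [p]).Pairwise (· ≤ ·) := (List.pairwise_append.mp h).1
    have hle : ∀ y ∈ zs ++ [p], y ≤ v := by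
      intro y hy
      exact (List.pairwise_append.mp h).2.2 y hy v (by simp)
    have hlep : ∀ y ∈ zs, y ≤ p := by
      intro y hy
      exact (List.pairwise_append.mp hzp).2.2 y hy p (by simp)
    rw [List.foldl_append, ih p hzp]
    by_cases hvp : v = p
    · subst hvp
      simp [pvScanStep, List.filter_append, List.count_append]
    · have hpv : p ≤ v := hle p (by simp)
      have hvnm : v ∉ zs ++ [p] := by
        intro hm
        rcases List.mem_append.mp hm with hm | hm
        · exact hvp (le_antisymm (hlep v hm) hpv)
        · exact hvp (by simpa using hm)
      have hcv : (zs ++ [p]).count v = 0 := List.count_eq_zero.mpr hvnm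
      have hfv : (zs ++ [p]).filter (fun x => x ≠ v) = zs ++ [p] := by
        apply List.filter_eq_self.mpr
        intro a ha
        simp only [ne_eq, decide_eq_true_eq]
        intro hav; exact hvnm (hav ▸ ha)
      have hsplit := oddVals_split (zs ++ [p]) p (by simp)
      have hfp : (zs ++ [p]).filter (fun x => x ≠ p) = zs.filter (fun x => x ≠ p) := by
        simp [List.filter_append]
      have hcp : (zs ++ [p]).count p = zs.count p + 1 := by simp
      have hmod : PySem.Int.mod ((zs.count p : Int) + 1) 2 = (((zs.count p + 1) % 2 : Nat) : Int) := by
        rw [PySem.Int.mod_eq_emod_of_pos (by norm_num)]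
        push_cast
        omega
      rw [List.foldl_cons, List.foldl_nil]
      simp only [pvScanStep]
      rw [if_pos hvp, hfv, hcv, hsplit, hfp, hcp, hmod]
      push_cast
      norm_num

-- scan + closing the final run = oddVals, on any nondecreasing list
lemma pvScan_final (xs : List Int) (h : xs.Pairwise (· ≤ ·)) :
    (xs.foldl pvScanStep ((0 : Int), (0 : Int), (none : Option Int))).1 +
      PySem.Int.mod (xs.foldl pvScanStep ((0 : Int), (0 : Int), (none : Option Int))).2.1 2 =
      (oddVals xs : Nat) := by
  induction xs using List.reverseRecOn with
  | nil => decide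
  | append_singleton ys v _ =>
    rw [pvScan_snoc ys v h]
    have hsplit := oddVals_split (ys ++ [v]) v (by simp)
    have hfv : (ys ++ [v]).filter (fun x => x ≠ v) = ys.filter (fun x => x ≠ v) := by
      simp [List.filter_append]
    have hcv : (ys ++ [v]).count v = ys.count v + 1 := by simp
    rw [hfv, hcv] at hsplit
    have hmod : PySem.Int.mod ((ys.count v : Int) + 1) 2 = (((ys.count v + 1) % 2 : Nat) : Int) := by
      rw [PySem.Int.mod_eq_emod_of_pos (by norm_num)]
      push_cast
      omega
    rw [hmod, hsplit]
    push_cast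
    ring

-- the list position Python's ve[i] reads for an in-range (possibly negative) index i
def pvPosn (L : Nat) (i : Int) : Nat := if 0 ≤ i then i.toNat else L - (-i).toNat

lemma pvIdx_inrange (L : Nat) (i : Int) (h0 : -(L:Int) ≤ i) (h1 : i < (L:Int)) :
    PySem.List.pyIdx? L i = some (pvPosn L i) := by
  unfold PySem.List.pyIdx? pvPosn
  split_ifs <;> simp <;> omega

lemma pvPosn_lt (L : Nat) (i : Int) (h0 : -(L:Int) ≤ i) (hlt : i < (L:Int)) :
    pvPosn L i < L := by
  unfold pvPosn; split_ifs <;> omega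

lemma pvPosn_spec (L : Nat) (i : Int) (h0 : -(L:Int) ≤ i) (h1 : i < (L:Int)) :
    (0 ≤ i ∧ (pvPosn L i : Int) = i) ∨ (i < 0 ∧ (pvPosn L i : Int) = i + L) := by
  unfold pvPosn
  split_ifs with h
  · exact Or.inl ⟨h, by omega⟩
  · exact Or.inr ⟨by omega, by omega⟩

lemma pvGetD_inrange (ve : List Int) (i : Int)
    (h0 : -(ve.length:Int) ≤ i) (h1 : i < (ve.length:Int)) :
    PySem.List.pyGetD ve i 0 = ve.getD (pvPosn ve.length i) 0 := by
  unfold PySem.List.pyGetD PySem.List.pyGet?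
  rw [pvIdx_inrange _ _ h0 h1]
  simp [List.getD_eq_getElem?_getD]

lemma pvIncr_eq (ve : List Int) (i : Int)
    (h0 : -(ve.length:Int) ≤ i) (h1 : i < (ve.length:Int)) :
    pvIncr ve i = ve.set (pvPosn ve.length i) (ve.getD (pvPosn ve.length i) 0 + 1) := by
  unfold pvIncr PySem.List.pySetD PySem.List.pySet?
  rw [pvIdx_inrange _ _ h0 h1, pvGetD_inrange _ _ h0 h1]
  rfl

lemma pvIncr_length (ve : List Int) (i : Int)
    (h0 : -(ve.length:Int) ≤ i) (h1 : i < (ve.length:Int)) :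
    (pvIncr ve i).length = ve.length := by
  rw [pvIncr_eq ve i h0 h1]; exact List.length_set ..

lemma pvIncr_getD (ve : List Int) (i : Int) (p : Nat) (hp : p < ve.length)
    (h0 : -(ve.length:Int) ≤ i) (h1 : i < (ve.length:Int)) :
    (pvIncr ve i).getD p 0 = ve.getD p 0 + (if pvPosn ve.length i = p then 1 else 0) := by
  rw [pvIncr_eq ve i h0 h1]
  have hlen : (ve.set (pvPosn ve.length i) (ve.getD (pvPosn ve.length i) 0 + 1)).length = ve.length :=
    List.length_set ..
  rw [List.getD_eq_getElem _ _ (by omega : p < (ve.set (pvPosn ve.length i) (ve.getD (pvPosn ve.length i) 0 + 1)).length), List.getElem_set]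
  by_cases hip : pvPosn ve.length i = p
  · rw [if_pos hip, if_pos hip, hip, List.getD_eq_getElem _ _ hp]
  · rw [if_neg hip, if_neg hip, List.getD_eq_getElem _ _ hp]
    ring

-- A's first loop builds the degree array: slot p counts the endpoints whose position is p
lemma pvFoldA_deg : ∀ (es : List (List Int)) (ve : List Int),
    (∀ e ∈ es, e.length = 2 ∧ ∀ x ∈ e, -(ve.length:Int) ≤ x ∧ x < (ve.length:Int)) →
    (es.foldl pvStepA ve).length = ve.length ∧
      ∀ p : Nat, p < ve.length → (es.foldl pvStepA ve).getD p 0 =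
        ve.getD p 0 + ((es.flatMap (fun e => e)).countP (fun x => pvPosn ve.length x == p) : Int) := by
  intro es
  induction es with
  | nil => intro ve _; exact ⟨rfl, by simp⟩
  | cons e es ih =>
    intro ve hbnd
    obtain ⟨hlen2, hexy⟩ := hbnd e (by simp)
    obtain ⟨i, j, rfl⟩ : ∃ i j, e = [i, j] := by
      match e, hlen2 with
      | [i, j], _ => exact ⟨i, j, rfl⟩
    have hi := hexy i (by simp)
    have hj := hexy j (by simp)
    have hli : (pvIncr ve i).length = ve.length := pvIncr_length ve i hi.1 hi.2
    have hlj : (pvIncr (pvIncr ve i) j).length = ve.length := by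
      rw [pvIncr_length _ j (by rw [hli]; exact hj.1) (by rw [hli]; exact hj.2), hli]
    simp only [List.foldl_cons]
    have hstep : pvStepA ve [i, j] = pvIncr (pvIncr ve i) j := rfl
    rw [hstep]
    obtain ⟨ihlen, ihget⟩ := ih (pvIncr (pvIncr ve i) j)
      (by rw [hlj]; exact fun e' he' => hbnd e' (by simp [he']))
    refine ⟨by rw [ihlen, hlj], ?_⟩
    intro p hp
    rw [ihget p (by rw [hlj]; exact hp), hlj]
    rw [pvIncr_getD _ j p (by rw [hli]; exact hp) (by rw [hli]; exact hj.1) (by rw [hli]; exact hj.2), hli]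
    rw [pvIncr_getD ve i p hp hi.1 hi.2]
    have hflat : (([i, j] :: es).flatMap (fun e => e)) = i :: j :: es.flatMap (fun e => e) := by
      simp
    rw [hflat]
    simp only [List.countP_cons]
    push_cast
    by_cases h1 : pvPosn ve.length i = p <;> by_cases h2 : pvPosn ve.length j = p <;>
      simp [h1, h2] <;> ring

-- positions of odd slots ↔ distinct labels with odd multiplicity (labels position-injective)
lemma pvBridge (L : Nat) (flat : List Int)
    (hb : ∀ x ∈ flat, -(L:Int) ≤ x ∧ x < (L:Int))
    (hinj : ∀ x ∈ flat, ∀ y ∈ flat, pvPosn L x = pvPosn L y → x = y) :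
    (List.range L).countP
        (fun p => (flat.countP (fun x => pvPosn L x == p)) % 2 == 1) = oddVals flat := by
  have hcnt : ∀ v ∈ flat, flat.countP (fun x => pvPosn L x == pvPosn L v) = flat.count v := by
    intro v hv
    rw [List.count_eq_countP]
    apply List.countP_congr
    intro x hx
    simp only [beq_iff_eq]
    exact ⟨fun h => hinj x hx v hv h, fun h => h ▸ rfl⟩
  set Q : Int → Bool := fun v => flat.count v % 2 == 1 with hQ
  set M : List Nat := (flat.dedup.filter Q).map (fun v => pvPosn L v) with hM
  have hsub : ∀ v ∈ flat.dedup.filter Q, v ∈ flat := fun v hv =>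
    List.mem_dedup.mp (List.mem_filter.mp hv).1
  have hMnd : M.Nodup := by
    rw [hM]
    refine List.Nodup.map_on ?_ (flat.nodup_dedup.filter _)
    intro x hx y hy hxy
    exact hinj x (hsub x hx) y (hsub y hy) hxy
  set P : Nat → Bool := fun p => (flat.countP (fun x => pvPosn L x == p)) % 2 == 1 with hP
  have hMmem : ∀ q : Nat, q ∈ M ↔ q ∈ (List.range L).filter P := by
    intro q
    rw [hM]
    simp only [List.mem_map, List.mem_filter, List.mem_range]
    constructor
    · rintro ⟨v, hv, rfl⟩
      have hvf : v ∈ flat := List.mem_dedup.mp hv.1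
      have hvq : Q v = true := hv.2
      refine ⟨pvPosn_lt L v (hb v hvf).1 (hb v hvf).2, ?_⟩
      rw [hP]
      simp only [hcnt v hvf]
      exact hvq
    · rintro ⟨hq, hpq⟩
      rw [hP] at hpq
      simp only [beq_iff_eq] at hpq
      have hpos : 0 < flat.countP (fun x => pvPosn L x == q) := by omega
      obtain ⟨v, hv, hvq⟩ := List.countP_pos_iff.mp hpos
      have hvq' : pvPosn L v = q := beq_iff_eq.mp hvq
      refine ⟨v, ⟨List.mem_dedup.mpr hv, ?_⟩, hvq'⟩
      rw [hQ]
      simp only [beq_iff_eq]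
      rw [← hcnt v hv, hvq']
      exact hpq
  have hperm : M.Perm ((List.range L).filter P) :=
    (List.perm_ext_iff_of_nodup hMnd ((List.nodup_range).filter _)).mpr hMmem
  have hlen : M.length = ((List.range L).filter P).length := hperm.length_eq
  rw [List.countP_eq_length_filter]
  unfold oddVals
  rw [List.countP_eq_length_filter]
  rw [← hlen, hM, List.length_map]

lemma pvSelf_eq_map_range (ve : List Int) :
    ve = (List.range ve.length).map (fun k => ve.getD k 0) := by
  apply List.ext_getElem
  · simp
  · intro i h1 h2
    simp [List.getD_eq_getElem?_getD, h1]

-- collecting the endpoints pairwise is flattening, when every row is a pair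
lemma pvGather_eq_flatMap : ∀ (es : List (List Int)) (acc : List Int),
    (∀ e ∈ es, e.length = 2) →
    es.foldl pvGather acc = acc ++ es.flatMap (fun e => e) := by
  intro es
  induction es with
  | nil => intro acc _; simp
  | cons e es ih =>
    intro acc hp
    obtain ⟨i, j, rfl⟩ : ∃ i j, e = [i, j] := by
      match e, hp e (by simp) with
      | [i, j], _ => exact ⟨i, j, rfl⟩
    rw [List.foldl_cons, show pvGather acc [i, j] = acc ++ [i] ++ [j] from rfl,
      ih _ (fun e' he' => hp e' (by simp [he']))]
    simp

-- ===== VERDICT (by name: the statement is the Claim_ definition above) =====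
theorem check_if_eulerian_path_exists_spec : Claim_equal_check_if_eulerian_path_exists := by
  intro n edges _ hpre
  unfold Spec_check_if_eulerian_path_exists
  unfold check_if_eulerian_path_exists check_if_eulerian_path_exists_alt
  obtain ⟨hpre1, hpre2⟩ := hpre
  set ve0 := (PySem.List.pyRange 0 n 1).map (fun _ => (0 : Int)) with hve0
  set flat := edges.flatMap (fun e => e) with hflat
  set L := ve0.length with hL
  have hlen0 : (L : Int) = max n 0 := by
    rw [hL, hve0]; simp [PySem.List.length_pyRange_one]
  have hnpos : ∀ x ∈ flat, (L : Int) = n := by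
    intro x hx
    obtain ⟨e, he, hxe⟩ := List.mem_flatMap.mp hx
    have := (hpre1 e he).2 x hxe
    omega
  have hbnd : ∀ e ∈ edges, e.length = 2 ∧ ∀ x ∈ e, -(L:Int) ≤ x ∧ x < (L:Int) := by
    intro e he
    refine ⟨(hpre1 e he).1, fun x hx => ?_⟩
    have h1 := (hpre1 e he).2 x hx
    have h2 := hnpos x (List.mem_flatMap.mpr ⟨e, he, hx⟩)
    omega
  have hb : ∀ x ∈ flat, -(L:Int) ≤ x ∧ x < (L:Int) := by
    intro x hx
    obtain ⟨e, he, hxe⟩ := List.mem_flatMap.mp hx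
    exact (hbnd e he).2 x hxe
  have hinj : ∀ x ∈ flat, ∀ y ∈ flat, pvPosn L x = pvPosn L y → x = y := by
    intro x hx y hy hxy
    obtain ⟨e1, he1, hxe1⟩ := List.mem_flatMap.mp hx
    obtain ⟨e2, he2, hye2⟩ := List.mem_flatMap.mp hy
    have hbx := hb x hx
    have hby := hb y hy
    have hsx := pvPosn_spec L x hbx.1 hbx.2
    have hsy := pvPosn_spec L y hby.1 hby.2
    have hn := hnpos x hx
    have hne1 : x - y ≠ n := hpre2 e1 he1 x hxe1 e2 he2 y hye2
    have hne2 : y - x ≠ n := hpre2 e2 he2 y hye2 e1 he1 x hxe1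
    omega
  obtain ⟨hlenf, hgetf⟩ := pvFoldA_deg edges ve0 hbnd
  set vef := edges.foldl pvStepA ve0 with hvef
  have hzero : ∀ q : Nat, ve0.getD q 0 = 0 := by
    intro q
    cases hq : ve0[q]? with
    | none => simp [List.getD_eq_getElem?_getD, hq]
    | some x =>
        have hx : x = 0 := by
          have := List.mem_of_getElem? hq
          rw [hve0] at this
          simp only [List.mem_map] at this
          obtain ⟨_, _, h⟩ := this
          omega
        simp [List.getD_eq_getElem?_getD, hq, hx]
  have hcount : vef.countP (fun v => PySem.Int.mod v 2 == 1) =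
      (List.range L).countP (fun p => (flat.countP (fun x => pvPosn L x == p)) % 2 == 1) := by
    conv_lhs => rw [pvSelf_eq_map_range vef]
    rw [List.countP_map, show vef.length = L from hlenf]
    apply List.countP_congr
    intro k hk
    have hkL : k < L := List.mem_range.mp hk
    simp only [Function.comp]
    rw [hgetf k hkL, hzero k, zero_add, ← hL, ← hflat]
    rw [PySem.Int.mod_eq_emod_of_pos (by norm_num)]
    simp only [beq_iff_eq]
    constructor
    · intro h; omega
    · intro h; omega
  have hgather : edges.foldl pvGather [] = flat := by
    rw [pvGather_eq_flatMap edges [] (fun e he => (hpre1 e he).1), List.nil_append]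
  rw [hgather]
  have hsort : (PySem.List.sorted flat (fun x => x)).Pairwise (· ≤ ·) := by
    simpa using PySem.List.sorted_pairwise flat (fun x => x)
  have hB := pvScan_final _ hsort
  have hperm : oddVals (PySem.List.sorted flat (fun x => x)) = oddVals flat :=
    oddVals_perm (PySem.List.sorted_perm flat (fun x => x) false)
  simp only [PySem.List.foldl_count_if, zero_add]
  rw [hcount, pvBridge L flat hb hinj, hB, hperm]
  cases ((oddVals flat : Int) == 0 || (oddVals flat : Int) == 2) <;> simp
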